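-- pv_equiv track=rewrite | github.com/maateonicolas/buscaminas-marie | src/generador_tablero.py | crear_mascara_cruz
-- ===== SOURCE A (Python) =====
-- from typing import List, Optional, Sequence, Tuple
--
-- Mascara = List[List[int]]
--
-- def crear_mascara_cruz(filas: int = 16, columnas: int = 16, grosor: int = 2) -> Mascara:
--     """
--     Genera una cruz centrada.
--     """
--     centro_f = filas // 2
--     centro_c = columnas // 2
--     mascara = [[0 for _ in range(columnas)] for _ in range(filas)]
--
--     for i in range(filas):
--         for j in range(columnas):
--             if abs(i - centro_f) <= grosor or abs(j - centro_c) <= grosor: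
--                 mascara[i][j] = 1
--     return mascara
-- ===== SOURCE B (Python) =====
-- def crear_mascara_cruz(filas: int = 16, columnas: int = 16, grosor: int = 2):
--     """Genera una cruz centrada (fila por fila, con filas precalculadas)."""
--     if filas <= 0:
--         return []
--     centro_f = filas // 2
--     centro_c = columnas // 2
--     col_cruz = [1 if abs(j - centro_c) <= grosor else 0 for j in range(columnas)]
--     fila_llena = [1] * columnas
--     return [list(fila_llena) if abs(i - centro_f) <= grosor else list(col_cruz)
--             for i in range(filas)]
-- ===== Notes on version B (the rewrite author's own statement) =====
-- stated objective: faster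
-- what changed: B precomputes a single cross-column row pattern and a full row once, then builds the grid by copying one of the two precomputed rows per row, instead of testing abs conditions per cell in a nested loop and mutating a zero grid.
import Mathlib
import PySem

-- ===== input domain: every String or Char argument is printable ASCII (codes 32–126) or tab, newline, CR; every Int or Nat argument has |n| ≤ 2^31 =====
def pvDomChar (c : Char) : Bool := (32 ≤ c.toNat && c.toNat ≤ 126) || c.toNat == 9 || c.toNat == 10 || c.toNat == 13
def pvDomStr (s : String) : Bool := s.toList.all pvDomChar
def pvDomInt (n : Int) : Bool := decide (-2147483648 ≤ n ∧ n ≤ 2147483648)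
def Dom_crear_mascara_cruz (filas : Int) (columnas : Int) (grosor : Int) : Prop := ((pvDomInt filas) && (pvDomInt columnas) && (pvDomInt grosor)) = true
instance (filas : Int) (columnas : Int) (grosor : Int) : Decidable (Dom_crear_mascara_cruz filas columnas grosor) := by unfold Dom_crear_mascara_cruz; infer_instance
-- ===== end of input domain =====

-- B precomputes the cross-column row pattern and the full row once and copies one of them per row,
-- instead of A's per-cell abs test mutating a zero grid (objective: faster by a constant factor).

-- ===== PORT A =====
def crear_mascara_cruz (filas : Int) (columnas : Int) (grosor : Int) : List (List Int) :=
  let centro_f := PySem.Int.floordiv filas 2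
  let centro_c := PySem.Int.floordiv columnas 2
  let mascara : List (List Int) :=
    (PySem.List.pyRange 0 filas 1).map (fun _ => (PySem.List.pyRange 0 columnas 1).map (fun _ => (0 : Int)))
  (PySem.List.pyRange 0 filas 1).foldl (fun m i =>
    (PySem.List.pyRange 0 columnas 1).foldl (fun m j =>
      if |i - centro_f| ≤ grosor ∨ |j - centro_c| ≤ grosor then
        PySem.List.pySetD m i (PySem.List.pySetD (PySem.List.pyGetD m i []) j 1)
      else m) m) mascara

-- ===== PORT B =====
def crear_mascara_cruz_alt (filas : Int) (columnas : Int) (grosor : Int) : List (List Int) :=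
  if filas ≤ 0 then [] else
  let centro_f := PySem.Int.floordiv filas 2
  let centro_c := PySem.Int.floordiv columnas 2
  let col_cruz := (PySem.List.pyRange 0 columnas 1).map (fun j => if |j - centro_c| ≤ grosor then (1 : Int) else 0)
  let fila_llena := List.replicate columnas.toNat (1 : Int)
  (PySem.List.pyRange 0 filas 1).map (fun i => if |i - centro_f| ≤ grosor then fila_llena else col_cruz)

-- ===== PRECONDITION & SPEC =====
def Spec_crear_mascara_cruz (filas : Int) (columnas : Int) (grosor : Int) (out : List (List Int)) : Prop := out = crear_mascara_cruz_alt filas columnas grosor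
instance (filas : Int) (columnas : Int) (grosor : Int) (out : List (List Int)) : Decidable (Spec_crear_mascara_cruz filas columnas grosor out) := by unfold Spec_crear_mascara_cruz; infer_instance

-- ===== CLAIM (what is proved, stated in full; the proofs are below) =====
def Claim_equal_crear_mascara_cruz : Prop := ∀ (filas : Int) (columnas : Int) (grosor : Int), Dom_crear_mascara_cruz filas columnas grosor → Spec_crear_mascara_cruz filas columnas grosor (crear_mascara_cruz filas columnas grosor)

-- ===== LEMMAS AND PROOFS =====

-- Row-level fold (the inner loop acting on one row): length is preserved.
theorem pv_row_len (q : Int → Prop) [DecidablePred q] (js : List Int) (r : List Int) :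
    (js.foldl (fun r j => if q j then PySem.List.pySetD r j 1 else r) r).length = r.length := by
  induction js generalizing r with
  | nil => rfl
  | cons j0 tl ih =>
      simp only [List.foldl_cons]
      rw [ih]
      split <;> simp [PySem.List.length_pySetD]

-- Row-level fold: element k of the result.
theorem pv_row_get (q : Int → Prop) [DecidablePred q] (js : List Int) (r : List Int) (k : Nat)
    (hk : k < r.length) (h0 : ∀ j ∈ js, 0 ≤ j) :
    (js.foldl (fun r j => if q j then PySem.List.pySetD r j 1 else r) r)[k]? =
      if ((k : Int) ∈ js ∧ q k) then some 1 else r[k]? := by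
  induction js generalizing r with
  | nil => simp
  | cons j0 tl ih =>
      have hj0 : 0 ≤ j0 := h0 j0 (by simp)
      simp only [List.foldl_cons]
      by_cases hq : q j0
      · rw [if_pos hq, PySem.List.pySetD_of_nonneg _ _ hj0,
            ih (r.set j0.toNat 1) (by simpa using hk) (fun j hj => h0 j (by simp [hj]))]
        by_cases hjk : j0 = (k : Int)
        · have hqk : q (k : Int) := hjk ▸ hq
          have hset : (r.set j0.toNat 1)[k]? = some 1 := by
            have ht : j0.toNat = k := by omega
            rw [ht]; exact List.getElem?_set_self hk
          simp [hjk, hqk, List.getElem?_set_self hk]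
        · have hne : j0.toNat ≠ k := by omega
          rw [List.getElem?_set_ne hne]
          by_cases hmem : (k : Int) ∈ tl <;> by_cases hqk : q (k : Int) <;>
            simp [List.mem_cons, hmem, hqk, Ne.symm hjk]
      · rw [if_neg hq, ih r hk (fun j hj => h0 j (by simp [hj]))]
        by_cases hjk : j0 = (k : Int)
        · have hnqk : ¬ q (k : Int) := hjk ▸ hq
          simp [hnqk]
        · simp [List.mem_cons, Ne.symm hjk]

-- Inner loop on the grid = pySetD of the row-level fold at row i.
theorem pv_inner_eq (q : Int → Prop) [DecidablePred q] (i : Int) (js : List Int)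
    (m : List (List Int)) (hi0 : 0 ≤ i) (hil : i.toNat < m.length) :
    js.foldl (fun m j => if q j then
        PySem.List.pySetD m i (PySem.List.pySetD (PySem.List.pyGetD m i []) j 1) else m) m =
      PySem.List.pySetD m i
        (js.foldl (fun r j => if q j then PySem.List.pySetD r j 1 else r)
          (PySem.List.pyGetD m i [])) := by
  have hilt : i < (m.length : Int) := by omega
  have hget : PySem.List.pyGetD m i [] = m[i.toNat] :=
    PySem.List.pyGetD_eq_getElem m [] hi0 hilt
  induction js generalizing m with
  | nil =>
      simp only [List.foldl_nil]
      rw [PySem.List.pySetD_of_nonneg _ _ hi0,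
          PySem.List.pyGetD_eq_getElem m [] hi0 (by omega),
          List.set_getElem_self hil]
  | cons j0 tl ih =>
      simp only [List.foldl_cons]
      by_cases hq : q j0
      · rw [if_pos hq, if_pos hq]
        have hlen : i.toNat <
            (PySem.List.pySetD m i (PySem.List.pySetD (PySem.List.pyGetD m i []) j0 1)).length := by
          rw [PySem.List.length_pySetD]; exact hil
        rw [ih _ hlen (by omega)
              (PySem.List.pyGetD_eq_getElem _ [] hi0 (by rw [PySem.List.length_pySetD]; omega))]
        have h2 : PySem.List.pyGetD
            (PySem.List.pySetD m i (PySem.List.pySetD (PySem.List.pyGetD m i []) j0 1)) i [] =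
            PySem.List.pySetD (PySem.List.pyGetD m i []) j0 1 := by
          rw [PySem.List.pySetD_of_nonneg _ _ hi0,
              PySem.List.pyGetD_eq_getElem _ [] hi0 (by simpa using hilt)]
          exact List.getElem_set_self (by simpa using hil)
        rw [h2, PySem.List.pySetD_of_nonneg _ _ hi0, PySem.List.pySetD_of_nonneg _ _ hi0,
            PySem.List.pySetD_of_nonneg _ _ hi0, List.set_set]
      · rw [if_neg hq, if_neg hq]
        exact ih m hil hilt hget

-- Inner loop on the grid: length is preserved.
theorem pv_inner_len (q : Int → Prop) [DecidablePred q] (i : Int) (cols : List Int)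
    (m : List (List Int)) :
    (cols.foldl (fun m j => if q j then
        PySem.List.pySetD m i (PySem.List.pySetD (PySem.List.pyGetD m i []) j 1) else m) m).length
      = m.length := by
  induction cols generalizing m with
  | nil => rfl
  | cons c0 ctl cih =>
      simp only [List.foldl_cons]
      rw [cih]
      split <;> simp [PySem.List.length_pySetD]

-- Outer loop: length is preserved.
theorem pv_outer_len (Q : Int → Int → Prop) [∀ i, DecidablePred (Q i)] (cols : List Int)
    (js : List Int) (m : List (List Int)) :
    (js.foldl (fun m i => cols.foldl (fun m j => if Q i j then
        PySem.List.pySetD m i (PySem.List.pySetD (PySem.List.pyGetD m i []) j 1) else m) m) m).length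
      = m.length := by
  induction js generalizing m with
  | nil => rfl
  | cons i0 tl ih =>
      simp only [List.foldl_cons]
      rw [ih, pv_inner_len (Q i0) i0 cols m]

-- Outer loop: row k of the result.
theorem pv_outer_get (Q : Int → Int → Prop) [∀ i, DecidablePred (Q i)] (cols : List Int)
    (js : List Int) (m : List (List Int)) (k : Nat)
    (hall : ∀ i ∈ js, 0 ≤ i ∧ i.toNat < m.length) (hnd : js.Nodup) (hk : k < m.length) :
    (js.foldl (fun m i => cols.foldl (fun m j => if Q i j then
        PySem.List.pySetD m i (PySem.List.pySetD (PySem.List.pyGetD m i []) j 1) else m) m) m)[k]? =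
      if (k : Int) ∈ js then
        some (cols.foldl (fun r j => if Q k j then PySem.List.pySetD r j 1 else r) (m.getD k []))
      else m[k]? := by
  induction js generalizing m with
  | nil => simp
  | cons i0 tl ih =>
      obtain ⟨hi0, hir⟩ := hall i0 (by simp)
      simp only [List.foldl_cons]
      rw [pv_inner_eq (Q i0) i0 cols m hi0 hir]
      have hlen1 : ∀ X, (PySem.List.pySetD m i0 X).length = m.length :=
        fun X => PySem.List.length_pySetD m i0 X
      rw [ih (PySem.List.pySetD m i0 _)
            (fun i hi => ⟨(hall i (by simp [hi])).1, by rw [hlen1]; exact (hall i (by simp [hi])).2⟩)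
            (List.Nodup.of_cons hnd) (by rw [hlen1]; exact hk)]
      by_cases hik : i0 = (k : Int)
      · rw [hik]
        have hnin : (k : Int) ∉ tl := hik ▸ (List.nodup_cons.mp hnd).1
        rw [if_neg hnin, if_pos (List.mem_cons_self)]
        rw [PySem.List.pySetD_natCast, List.getElem?_set_self hk,
            PySem.List.pyGetD_natCast]
      · have hne : i0.toNat ≠ k := by omega
        have hgd : (PySem.List.pySetD m i0
            (cols.foldl (fun r j => if Q i0 j then PySem.List.pySetD r j 1 else r)
              (PySem.List.pyGetD m i0 []))).getD k [] = m.getD k [] := by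
          rw [PySem.List.pySetD_of_nonneg _ _ hi0, List.getD_eq_getElem?_getD,
              List.getElem?_set_ne hne, ← List.getD_eq_getElem?_getD]
        have hge : (PySem.List.pySetD m i0
            (cols.foldl (fun r j => if Q i0 j then PySem.List.pySetD r j 1 else r)
              (PySem.List.pyGetD m i0 [])))[k]? = m[k]? := by
          rw [PySem.List.pySetD_of_nonneg _ _ hi0, List.getElem?_set_ne hne]
        rw [hgd, hge]
        by_cases hmem : (k : Int) ∈ tl <;>
          simp [List.mem_cons, hmem, Ne.symm hik]

-- Main bridging lemma, stated with Nat sizes so the pyRange lemmas apply directly.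
theorem pv_main (F C : Nat) (cf cc g : Int) :
    (PySem.List.pyRange 0 (F : Int) 1).foldl (fun m i =>
      (PySem.List.pyRange 0 (C : Int) 1).foldl (fun m j =>
        if |i - cf| ≤ g ∨ |j - cc| ≤ g then
          PySem.List.pySetD m i (PySem.List.pySetD (PySem.List.pyGetD m i []) j 1)
        else m) m)
      ((PySem.List.pyRange 0 (F : Int) 1).map (fun _ =>
        (PySem.List.pyRange 0 (C : Int) 1).map (fun _ => (0 : Int))))
    = (PySem.List.pyRange 0 (F : Int) 1).map (fun i =>
        if |i - cf| ≤ g then List.replicate C (1 : Int)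
        else (PySem.List.pyRange 0 (C : Int) 1).map (fun j => if |j - cc| ≤ g then (1 : Int) else 0)) := by
  have hlen0 : ((PySem.List.pyRange 0 (F : Int) 1).map (fun _ =>
      (PySem.List.pyRange 0 (C : Int) 1).map (fun _ => (0 : Int)))).length = F := by
    simp [PySem.List.length_pyRange_one]
  have hlenz : ((PySem.List.pyRange 0 (C : Int) 1).map (fun _ => (0 : Int))).length = C := by
    simp [PySem.List.length_pyRange_one]
  apply List.ext_getElem?
  intro k
  by_cases hkF : k < F
  · rw [pv_outer_get (fun i j => |i - cf| ≤ g ∨ |j - cc| ≤ g) _ _ _ k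
        (fun i hi => by
          have := PySem.List.mem_pyRange_one.mp hi
          exact ⟨this.1, by rw [hlen0]; omega⟩)
        (PySem.List.nodup_pyRange_one 0 (F : Int)) (by rw [hlen0]; exact hkF)]
    have hmem : ((k : Nat) : Int) ∈ PySem.List.pyRange 0 (F : Int) 1 :=
      PySem.List.mem_pyRange_one.mpr ⟨by omega, by exact_mod_cast hkF⟩
    rw [if_pos hmem, PySem.List.getElem?_map_pyRange_zero _ F k hkF]
    have hg0 : ((PySem.List.pyRange 0 (F : Int) 1).map (fun _ =>
        (PySem.List.pyRange 0 (C : Int) 1).map (fun _ => (0 : Int)))).getD k [] =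
        (PySem.List.pyRange 0 (C : Int) 1).map (fun _ => (0 : Int)) := by
      rw [List.getD_eq_getElem?_getD, PySem.List.getElem?_map_pyRange_zero _ F k hkF]
      rfl
    rw [hg0]
    congr 1
    apply List.ext_getElem?
    intro j
    by_cases hjC : j < C
    · rw [pv_row_get _ _ _ j (by rw [hlenz]; exact hjC)
          (fun x hx => (PySem.List.mem_pyRange_one.mp hx).1)]
      have hmemj : ((j : Nat) : Int) ∈ PySem.List.pyRange 0 (C : Int) 1 :=
        PySem.List.mem_pyRange_one.mpr ⟨by omega, by exact_mod_cast hjC⟩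
      have hz : ((PySem.List.pyRange 0 (C : Int) 1).map (fun _ => (0 : Int)))[j]? = some 0 :=
        PySem.List.getElem?_map_pyRange_zero _ C j hjC
      by_cases h1 : |(k : Int) - cf| ≤ g
      · simp [h1, hmemj, hjC]
      · rw [if_neg h1,
            PySem.List.getElem?_map_pyRange_zero (fun j => if |j - cc| ≤ g then (1 : Int) else 0) C j hjC,
            hz]
        by_cases h2 : |(j : Int) - cc| ≤ g <;> simp [h1, h2, hmemj]
    · rw [List.getElem?_eq_none (by rw [pv_row_len, hlenz]; omega),
          List.getElem?_eq_none]
      split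
      · simp; omega
      · rw [List.length_map, PySem.List.length_pyRange_one]; omega
  · rw [List.getElem?_eq_none (by rw [pv_outer_len, hlen0]; omega),
        List.getElem?_eq_none (by rw [List.length_map, PySem.List.length_pyRange_one]; omega)]

-- ===== VERDICT (by name: the statement is the Claim_ definition above) =====
theorem crear_mascara_cruz_spec : Claim_equal_crear_mascara_cruz := by
  intro filas columnas grosor _
  unfold Spec_crear_mascara_cruz crear_mascara_cruz crear_mascara_cruz_alt
  have hF : PySem.List.pyRange 0 filas 1 = PySem.List.pyRange 0 ((filas.toNat : Nat) : Int) 1 := by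
    rw [PySem.List.pyRange_one, PySem.List.pyRange_one]
    congr 2
    omega
  have hC : PySem.List.pyRange 0 columnas 1 = PySem.List.pyRange 0 ((columnas.toNat : Nat) : Int) 1 := by
    rw [PySem.List.pyRange_one, PySem.List.pyRange_one]
    congr 2
    omega
  simp only [hF, hC]
  rw [pv_main filas.toNat columnas.toNat (PySem.Int.floordiv filas 2)
    (PySem.Int.floordiv columnas 2) grosor]
  by_cases hf : filas ≤ 0
  · rw [if_pos hf]
    have h0 : filas.toNat = 0 := by omega
    simp [h0, PySem.List.pyRange_one]
  · rw [if_neg hf]
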